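-- pv_equiv track=rewrite | github.com/wuc567/Pattern-Mining | OWSP-Miner/Python/BFROF.py | diguipd
-- ===== SOURCE A (Python) =====
-- def pdR(s,R):
--     for i in s:
--         if i not in R:
--             return False
--     return True
--
-- def diguipd(k,sample,R):
--     sup = 0
--     m = [[-1] for i in range(len(sample))]
--     ll = 0
--     i = 0
--     while i < len(k):
--         l = 0
--         for j in range(len(sample) - 1, -1, -1):
--             if j == 0 and k[i] == sample[j]:
--                 m[j][ll] = i
--                 break
--             elif k[i] == sample[j] and j != 0 and m[j - 1][ll] != -1 and m[j][ll] == -1: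
--                 if pdR(k[m[j - 1][ll] + 1:i], R) or m[j - 1][ll] + 1 == i:
--                     m[j][ll] = i
--                 else:
--                     i = i - 1
--                     l = 1
--                 break
--         if l == 1 or m[len(sample) - 1][ll] != -1:
--             for j in range(len(sample)):
--                 m[j].append(-1)
--             if m[len(sample) - 1][ll] != -1:
--                 sup = sup + 1
--             ll = ll + 1
--         i = i + 1
--     return sup
-- ===== SOURCE B (Python) =====
-- def diguipd(k, sample, R):
--     Rs = set(R)
--     ms = len(sample)
--     pos = {}   # value -> ascending list of stage indices j >= 1 with sample[j] == value
--     for j in range(1, ms):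
--         pos.setdefault(sample[j], []).append(j)
--     sup = 0
--     cur = [None] * ms          # cur[j]: None, or (position, non-R count in k[:pos+1])
--     b = 0                      # number of non-R elements in k[:i]
--     for i, x in enumerate(k):
--         nb = b + (x not in Rs)
--         broke = False
--         for j in reversed(pos.get(x, ())):
--             if cur[j - 1] is not None and cur[j] is None:
--                 if b == cur[j - 1][1]:
--                     cur[j] = (i, nb)
--                 else:
--                     cur = [None] * ms
--                     if x == sample[0]:
--                         cur[0] = (i, nb)
--                 broke = True
--                 break
--         if not broke and x == sample[0]:
--             cur[0] = (i, nb)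
--         if cur[ms - 1] is not None:
--             sup += 1
--             cur = [None] * ms
--         b = nb
--     return sup
-- ===== Notes on version B (the rewrite author's own statement) =====
-- stated objective: faster
-- what changed: B replaces A's ever-growing match matrix, index backtracking, per-step scan over all stages and pdR slice re-scans by a single one-pass current-match column plus a value->stage-indices hash index (so only stages carrying the current element are visited) and a running count of non-R elements that turns the gap test into an O(1) comparison.
import Mathlib
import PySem

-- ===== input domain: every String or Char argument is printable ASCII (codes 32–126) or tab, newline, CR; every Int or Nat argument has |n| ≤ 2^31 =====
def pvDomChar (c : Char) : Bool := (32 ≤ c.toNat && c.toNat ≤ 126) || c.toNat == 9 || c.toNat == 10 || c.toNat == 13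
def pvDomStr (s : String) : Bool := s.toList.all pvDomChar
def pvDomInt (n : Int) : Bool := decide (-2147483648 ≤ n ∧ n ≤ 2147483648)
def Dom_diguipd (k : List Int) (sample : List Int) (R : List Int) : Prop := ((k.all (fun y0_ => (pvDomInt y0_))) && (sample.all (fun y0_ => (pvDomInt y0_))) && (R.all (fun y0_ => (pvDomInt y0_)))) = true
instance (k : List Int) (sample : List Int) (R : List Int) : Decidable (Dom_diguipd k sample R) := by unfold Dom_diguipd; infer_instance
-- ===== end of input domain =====

-- B replaces A's growing match matrix and O(gap·|R|) slice re-scans by a single current-match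
-- column that stores, with each matched position, the running count of non-R elements, making
-- the gap test a constant-time comparison (objective: faster, single pass).

-- ===== PORT A =====
-- helper pdR: 'for i in s: if i not in R: return False / return True'
def pdRPort (s R : List Int) : Bool :=
  match s with
  | [] => true
  | x :: xs => if x ∈ R then pdRPort xs R else false

-- m[j][ll] (reads are always in range on admitted inputs; getD only totalises)
def mreadA (m : List (List Int)) (j ll : Nat) : Int := (m.getD j []).getD ll (-1)
-- m[j][ll] = v
def mwriteA (m : List (List Int)) (j ll : Nat) (v : Int) : List (List Int) :=
  m.set j ((m.getD j []).set ll v)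

-- the inner 'for j in range(len(sample)-1, -1, -1)' with its breaks; returns (m, l)
def innerA (k sample R : List Int) (m : List (List Int)) (ll : Nat) (i x : Int) :
    Nat → List (List Int) × Bool
  | 0 => if x = sample.getD 0 0 then (mwriteA m 0 ll i, false) else (m, false)
  | j+1 =>
    if x = sample.getD (j+1) 0 ∧ mreadA m j ll ≠ -1 ∧ mreadA m (j+1) ll = -1 then
      if pdRPort (PySem.List.slice k (some (mreadA m j ll + 1)) (some i)) R = true
          ∨ mreadA m j ll + 1 = i then
        (mwriteA m (j+1) ll i, false)
      else (m, true)              -- 'i = i - 1; l = 1' is applied by the caller via the flag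
    else innerA k sample R m ll i x j

-- the while loop; fuel only totalises (each index is processed at most twice)
def loopA (k sample R : List Int) : Nat → Int → List (List Int) → Nat → Int → Int
  | 0, sup, _, _, _ => sup
  | fuel+1, sup, m, ll, i =>
    if i < (k.length : Int) then
      let x := (PySem.List.pyGet? k i).getD 0
      let r := innerA k sample R m ll i x (sample.length - 1)
      if r.2 = true ∨ mreadA r.1 (sample.length - 1) ll ≠ -1 then
        -- append -1 to every row, bump sup if the column is complete, ll += 1, i = (i-1)+1 or i+1
        let sup' := if mreadA r.1 (sample.length - 1) ll ≠ -1 then sup + 1 else sup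
        loopA k sample R fuel sup' (r.1.map (fun row => row ++ [-1])) (ll+1)
          ((if r.2 = true then i - 1 else i) + 1)
      else loopA k sample R fuel sup r.1 ll (i+1)
    else sup

def diguipd (k : List Int) (sample : List Int) (R : List Int) : Int :=
  loopA k sample R (2 * k.length + 2) 0 (List.replicate sample.length [-1]) 0 0

-- ===== PORT B =====
-- 'pos.setdefault(sample[j], []).append(j)' for j in range(1, ms): value -> ascending stage list
def buildPos (sample : List Int) : PySem.Dict Int (List Int) :=
  (PySem.List.pyRange 1 (sample.length : Int) 1).foldl
    (fun pos j =>
      PySem.Dict.insert pos (sample.getD j.toNat 0)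
        ((PySem.Dict.getD pos (sample.getD j.toNat 0) []) ++ [j]))
    PySem.Dict.empty

-- 'for j in reversed(pos.get(x, ())): ... break' of Source B; returns (cur, broke)
-- (stage indices j in pos are ≥ 1, so .toNat is exact)
def innerB (sample : List Int) (ms i : Nat) (b nb x : Int) :
    List Int → List (Option (Int × Int)) → List (Option (Int × Int)) × Bool
  | [], cur => (cur, false)
  | j :: js, cur =>
    if (cur.getD (j.toNat - 1) none).isSome ∧ cur.getD j.toNat none = none then
      if b = ((cur.getD (j.toNat - 1) none).getD (0, 0)).2 then
        (cur.set j.toNat (some ((i : Int), nb)), true)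
      else
        (let c : List (Option (Int × Int)) := List.replicate ms none
         (if x = sample.getD 0 0 then c.set 0 (some ((i : Int), nb)) else c), true)
    else innerB sample ms i b nb x js cur

-- 'for i, x in enumerate(k)' of Source B; b = number of non-R elements of k[:i]
def loopB (sample : List Int) (ms : Nat) (Rs : PySem.Set Int)
    (pos : PySem.Dict Int (List Int)) :
    List Int → Nat → Int → Int → List (Option (Int × Int)) → Int
  | [], _, _, sup, _ => sup
  | x :: rest, i, b, sup, cur =>
    let nb := b + (if x ∈ Rs then 0 else 1)
    let r := innerB sample ms i b nb x ((PySem.Dict.getD pos x []).reverse) cur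
    let cur1 := if r.2 = false ∧ x = sample.getD 0 0
      then r.1.set 0 (some ((i : Int), nb)) else r.1
    if (cur1.getD (ms - 1) none).isSome then
      loopB sample ms Rs pos rest (i+1) nb (sup+1) (List.replicate ms none)
    else loopB sample ms Rs pos rest (i+1) nb sup cur1

def diguipd_alt (k : List Int) (sample : List Int) (R : List Int) : Int :=
  loopB sample sample.length (PySem.Set.ofList R) (buildPos sample) k 0 0 0
    (List.replicate sample.length none)

-- ===== PRECONDITION & SPEC =====
-- Pre_ excludes exactly the inputs where A raises IndexError: sample = [] with k nonempty
-- (A evaluates m[-1][ll] on the empty matrix m = []).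
def Pre_diguipd (k : List Int) (sample : List Int) (R : List Int) : Prop :=
  sample ≠ [] ∨ k = []
instance (k : List Int) (sample : List Int) (R : List Int) : Decidable (Pre_diguipd k sample R) := by
  unfold Pre_diguipd; infer_instance

def pvWitness_diguipd : List Int × List Int × List Int := ([1, 2, 1, 3, 3, 1, 3], [1, 3], [2])

def Spec_diguipd (k : List Int) (sample : List Int) (R : List Int) (out : Int) : Prop := out = diguipd_alt k sample R
instance (k : List Int) (sample : List Int) (R : List Int) (out : Int) : Decidable (Spec_diguipd k sample R out) := by unfold Spec_diguipd; infer_instance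

-- ===== CLAIM (what is proved, stated in full; the proofs are below) =====
def Claim_equal_diguipd : Prop := ∀ (k : List Int) (sample : List Int) (R : List Int), Dom_diguipd k sample R → Pre_diguipd k sample R → Spec_diguipd k sample R (diguipd k sample R)

-- ===== LEMMAS AND PROOFS =====

-- number of elements of k[:t] that are not in R
def badCnt (k R : List Int) (t : Nat) : Int :=
  ((k.take t).countP (fun y => !decide (y ∈ R)) : Int)

-- relation between one entry of A's current column and B's current column
def relE (k R : List Int) (bnd : Nat) (v : Int) (o : Option (Int × Int)) : Prop :=
  (v = -1 ∧ o = none) ∨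
  ∃ p : Nat, p < bnd ∧ v = (p : Int) ∧ o = some ((p : Int), badCnt k R (p+1))

lemma relE_mono {k R : List Int} {b1 b2 : Nat} {v o} (h : relE k R b1 v o) (hb : b1 ≤ b2) :
    relE k R b2 v o := by
  rcases h with h | ⟨p, hp, hv, ho⟩
  · exact Or.inl h
  · exact Or.inr ⟨p, lt_of_lt_of_le hp hb, hv, ho⟩

lemma relE_none_iff {k R : List Int} {bnd v o} (h : relE k R bnd v o) :
    (v = -1 ↔ o = none) := by
  rcases h with ⟨hv, ho⟩ | ⟨p, _, hv, ho⟩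
  · simp [hv, ho]
  · constructor
    · intro hc; rw [hv] at hc; omega
    · intro hc; simp [ho] at hc

lemma pdRPort_true_iff (s R : List Int) : pdRPort s R = true ↔ ∀ y ∈ s, y ∈ R := by
  induction s with
  | nil => simp [pdRPort]
  | cons x xs ih =>
    by_cases hx : x ∈ R <;> simp [pdRPort, hx, ih]

lemma badCnt_succ (k R : List Int) (i : Nat) (hi : i < k.length) :
    badCnt k R (i+1) = badCnt k R i + (if k[i] ∈ R then 0 else 1) := by
  unfold badCnt
  rw [List.take_add_one, List.countP_append]
  have : k[i]? = some k[i] := List.getElem?_eq_getElem hi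
  by_cases hmem : k[i] ∈ R <;> simp [this, hmem]

lemma gap_iff (k R : List Int) (p i : Nat) (hpi : p < i) (hi : i ≤ k.length) :
    (pdRPort (PySem.List.slice k (some ((p : Int) + 1)) (some (i : Int))) R = true
      ∨ (p : Int) + 1 = (i : Int)) ↔ badCnt k R i = badCnt k R (p+1) := by
  have hslice : PySem.List.slice k (some ((p : Int) + 1)) (some (i : Int))
      = (k.drop (p+1)).take (i - (p+1)) := by
    have h1 : ((p : Int) + 1) = ((p + 1 : Nat) : Int) := by push_cast; ring
    rw [h1, PySem.List.slice_natCast]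
  have hsplit : k.take i = k.take (p+1) ++ (k.drop (p+1)).take (i - (p+1)) := by
    conv_lhs => rw [show i = (p+1) + (i - (p+1)) by omega]
    exact List.take_add
  have hall : pdRPort ((k.drop (p+1)).take (i - (p+1))) R = true
      ↔ (((k.drop (p+1)).take (i - (p+1))).countP (fun y => !decide (y ∈ R)) = 0) := by
    rw [pdRPort_true_iff, List.countP_eq_zero]
    constructor
    · intro h a ha; simp [h a ha]
    · intro h a ha; have := h a ha; simpa using this
  unfold badCnt
  rw [hslice, hsplit, List.countP_append]
  constructor
  · rintro (h | h)
    · have := hall.mp h; push_cast; omega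
    · have hpe : p + 1 = i := by omega
      have : i - (p+1) = 0 := by omega
      simp [this]
  · intro h
    left
    rw [hall]
    push_cast at h
    omega

-- generic getD/set facts
lemma getD_set' {α : Type} (l : List α) (n m : Nat) (v d : α) :
    (l.set n v).getD m d = if n = m ∧ n < l.length then v else l.getD m d := by
  by_cases h1 : n = m
  · subst h1
    by_cases h2 : n < l.length <;>
      simp [List.getD_eq_getElem?_getD, List.getElem?_set, h2]
  · simp [List.getD_eq_getElem?_getD, List.getElem?_set, h1]

-- shape invariant for A's matrix
def RowsOk (m : List (List Int)) (ms L : Nat) : Prop :=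
  m.length = ms ∧ ∀ j < ms, (m.getD j []).length = L

lemma mread_mwrite_self {m : List (List Int)} {ms L : Nat} (h : RowsOk m ms L)
    {j ll : Nat} (v : Int) (hj : j < ms) (hll : ll < L) :
    mreadA (mwriteA m j ll v) j ll = v := by
  obtain ⟨hlen, hrow⟩ := h
  unfold mreadA mwriteA
  rw [getD_set' m j j _ [], if_pos ⟨rfl, by omega⟩, getD_set',
      if_pos ⟨rfl, by rw [hrow j hj]; omega⟩]

lemma mread_mwrite_ne {m : List (List Int)} {j j' ll : Nat} (v : Int) (hne : j ≠ j') :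
    mreadA (mwriteA m j ll v) j' ll = mreadA m j' ll := by
  unfold mreadA mwriteA
  rw [getD_set' m j j' _ []]
  simp [hne]

lemma RowsOk_mwrite {m : List (List Int)} {ms L : Nat} (h : RowsOk m ms L)
    (j ll : Nat) (v : Int) : RowsOk (mwriteA m j ll v) ms L := by
  obtain ⟨hlen, hrow⟩ := h
  constructor
  · simpa [mwriteA] using hlen
  · intro j' hj'
    unfold mwriteA
    rw [getD_set' m j j' _ []]
    split_ifs with hc
    · rcases hc with ⟨hc1, hc2⟩
      subst hc1
      rw [List.length_set]
      exact hrow _ hj'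
    · exact hrow j' hj'

lemma getD_map_append (m : List (List Int)) (j : Nat) (hj : j < m.length) :
    (m.map (fun row => row ++ [-1])).getD j [] = (m.getD j []) ++ [-1] := by
  simp [List.getD_eq_getElem?_getD, List.getElem?_eq_getElem, hj]

lemma RowsOk_append {m : List (List Int)} {ms L : Nat} (h : RowsOk m ms L) :
    RowsOk (m.map (fun row => row ++ [-1])) ms (L+1) := by
  obtain ⟨hlen, hrow⟩ := h
  refine ⟨by simpa using hlen, fun j hj => ?_⟩
  rw [getD_map_append m j (by omega), List.length_append, hrow j hj]
  rfl

lemma mread_append_fresh {m : List (List Int)} {ms ll : Nat} (h : RowsOk m ms (ll+1))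
    {j : Nat} (hj : j < ms) :
    mreadA (m.map (fun row => row ++ [-1])) j (ll+1) = -1 := by
  obtain ⟨hlen, hrow⟩ := h
  have hL : (m.getD j []).length = ll + 1 := hrow j hj
  unfold mreadA
  rw [getD_map_append m j (by omega), ← hL]
  simp [List.getD_eq_getElem?_getD, List.getElem?_append_right]

-- the inner scan on a completely fresh column only applies the j = 0 rule
lemma innerA_fresh (k sample R : List Int) (m : List (List Int)) (ll : Nat) (i x : Int)
    (ms : Nat) (hfresh : ∀ j < ms, mreadA m j ll = -1) :
    ∀ j, j < ms →
      innerA k sample R m ll i x j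
        = (if x = sample.getD 0 0 then mwriteA m 0 ll i else m, false) := by
  intro j
  induction j with
  | zero =>
    intro _
    by_cases hx : x = sample.getD 0 0
    · simp only [innerA]
      rw [if_pos hx, if_pos hx]
    · simp only [innerA]
      rw [if_neg hx, if_neg hx]
  | succ j ih =>
    intro hj
    have hj' : j < ms := by omega
    have := hfresh j hj'
    simp only [innerA]
    rw [if_neg (by simp [this])]
    exact ih hj'

-- ascending list of stage indices in [1, t) whose sample value is x (as Ints)
def stagesTo (sample : List Int) (x : Int) (t : Int) : List Int :=
  (PySem.List.pyRange 1 t 1).filter (fun j => sample.getD j.toNat 0 = x)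

-- B's inner scan followed by its 'if not broke and x == sample[0]' first-stage rule
def afterB (sample : List Int) (ms i : Nat) (b nb x : Int)
    (js : List Int) (cur : List (Option (Int × Int))) : List (Option (Int × Int)) :=
  if (innerB sample ms i b nb x js cur).2 = false ∧ x = sample.getD 0 0
    then (innerB sample ms i b nb x js cur).1.set 0 (some ((i : Int), nb))
    else (innerB sample ms i b nb x js cur).1

lemma stagesTo_one (sample : List Int) (x : Int) : stagesTo sample x 1 = [] := by
  unfold stagesTo
  rw [PySem.List.pyRange_one_eq_nil (by omega)]
  rfl

lemma stagesTo_succ (sample : List Int) (x : Int) (j : Nat) :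
    (stagesTo sample x ((j : Int) + 1 + 1)).reverse
      = (if sample.getD (j+1) 0 = x
          then ((j+1 : Nat) : Int) :: (stagesTo sample x ((j : Int) + 1)).reverse
          else (stagesTo sample x ((j : Int) + 1)).reverse) := by
  unfold stagesTo
  rw [PySem.List.pyRange_one_succ_right (by omega), List.filter_append, List.reverse_append]
  have ht : ((j : Int) + 1).toNat = j + 1 := by omega
  by_cases hp : sample.getD (j+1) 0 = x
  · rw [if_pos hp]
    have hp' : sample[j+1]?.getD 0 = x := by
      simpa [List.getD_eq_getElem?_getD] using hp
    have : List.filter (fun jj => decide (sample.getD jj.toNat 0 = x)) [(j : Int) + 1]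
        = [(j : Int) + 1] := by
      simp [List.filter, ht, hp']
    rw [this]
    simp
  · rw [if_neg hp]
    have hp' : ¬ sample[j+1]?.getD 0 = x := by
      simpa [List.getD_eq_getElem?_getD] using hp
    have : List.filter (fun jj => decide (sample.getD jj.toNat 0 = x)) [(j : Int) + 1]
        = [] := by
      simp [List.filter, ht, hp']
    rw [this]
    simp

-- characterization of the dict built by buildPos
lemma build_fold_inv (sample : List Int) :
    ∀ (n : Nat) (d : PySem.Dict Int (List Int)) (x : Int),
      PySem.Dict.getD
        ((PySem.List.pyRange 1 (1 + (n : Int)) 1).foldl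
          (fun pos j =>
            PySem.Dict.insert pos (sample.getD j.toNat 0)
              ((PySem.Dict.getD pos (sample.getD j.toNat 0) []) ++ [j]))
          d) x []
        = PySem.Dict.getD d x [] ++ stagesTo sample x (1 + (n : Int)) := by
  intro n
  induction n with
  | zero =>
    intro d x
    rw [show ((1 : Int) + ((0 : Nat) : Int)) = 1 by norm_num]
    rw [PySem.List.pyRange_one_eq_nil (by omega), stagesTo_one]
    simp
  | succ n ih =>
    intro d x
    have hc : (1 + ((n+1 : Nat) : Int)) = (1 + (n : Int)) + 1 := by push_cast; ring
    rw [hc, PySem.List.pyRange_one_succ_right (by omega), List.foldl_append]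
    simp only [List.foldl]
    rw [PySem.Dict.getD_insert]
    unfold stagesTo
    rw [PySem.List.pyRange_one_succ_right (by omega), List.filter_append]
    by_cases hx : x = sample.getD (1 + (n : Int)).toNat 0
    · rw [if_pos hx, ← hx, ih d x]
      have hx' : sample[(1 + (n : Int)).toNat]?.getD 0 = x := by
        simpa [List.getD_eq_getElem?_getD] using hx.symm
      have : List.filter (fun jj => decide (sample.getD jj.toNat 0 = x)) [1 + (n : Int)]
          = [1 + (n : Int)] := by
        simp [List.filter, hx']
      rw [this]
      unfold stagesTo
      simp
    · rw [if_neg hx, ih d x]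
      have hx' : ¬ sample[(1 + (n : Int)).toNat]?.getD 0 = x := by
        intro hcon
        exact hx (by simpa [List.getD_eq_getElem?_getD] using hcon.symm)
      have : List.filter (fun jj => decide (sample.getD jj.toNat 0 = x)) [1 + (n : Int)]
          = [] := by
        simp [List.filter, hx']
      rw [this]
      unfold stagesTo
      simp

lemma buildPos_getD (sample : List Int) (x : Int) (hpos : 0 < sample.length) :
    PySem.Dict.getD (buildPos sample) x [] = stagesTo sample x (sample.length : Int) := by
  unfold buildPos
  rw [show ((sample.length : Int)) = 1 + ((sample.length - 1 : Nat) : Int) by push_cast; omega]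
  rw [build_fold_inv sample (sample.length - 1) PySem.Dict.empty x]
  simp [PySem.Dict.empty, PySem.Dict.getD, PySem.Dict.get?]

-- one synchronized inner scan: either both succeed/no-op, or both hit a failed gap test
lemma inner_step (k sample R : List Int) (ms : Nat) (hms : ms = sample.length)
    (i : Nat) (hi : i < k.length) (x b nb : Int)
    (hb : b = badCnt k R i) (hnb : nb = badCnt k R (i+1))
    (m : List (List Int)) (ll : Nat) (cur : List (Option (Int × Int)))
    (hrows : RowsOk m ms (ll+1)) (hcl : cur.length = ms)
    (hrel : ∀ j' < ms, relE k R i (mreadA m j' ll) (cur.getD j' none)) :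
    ∀ j, j < ms →
      (∃ m',
        innerA k sample R m ll (i : Int) x j = (m', false) ∧
        RowsOk m' ms (ll+1) ∧
        (afterB sample ms i b nb x ((stagesTo sample x ((j : Int)+1)).reverse) cur).length = ms ∧
        (∀ j' < ms, relE k R (i+1) (mreadA m' j' ll)
          ((afterB sample ms i b nb x ((stagesTo sample x ((j : Int)+1)).reverse) cur).getD j' none)))
      ∨ (2 ≤ ms ∧
         innerA k sample R m ll (i : Int) x j = (m, true) ∧
         afterB sample ms i b nb x ((stagesTo sample x ((j : Int)+1)).reverse) cur =
           (if x = sample.getD 0 0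
             then (List.replicate ms (none : Option (Int × Int))).set 0 (some ((i : Int), nb))
             else List.replicate ms none)) := by
  intro j
  induction j with
  | zero =>
    intro hj
    left
    have hafter : afterB sample ms i b nb x ((stagesTo sample x (((0 : Nat) : Int)+1)).reverse) cur
        = if x = sample.getD 0 0 then cur.set 0 (some ((i : Int), nb)) else cur := by
      rw [show (((0 : Nat) : Int) + 1) = 1 by norm_num, stagesTo_one]
      unfold afterB
      simp only [List.reverse_nil, innerB]
      by_cases hx : x = sample.getD 0 0
      · simp [hx]
      · simp [hx]
    rw [hafter]
    by_cases hx : x = sample.getD 0 0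
    · rw [if_pos hx]
      refine ⟨mwriteA m 0 ll (i : Int), by simp only [innerA]; rw [if_pos hx],
        RowsOk_mwrite hrows 0 ll _, by simp [hcl], ?_⟩
      intro j' hj'
      by_cases hj0 : j' = 0
      · subst hj0
        rw [mread_mwrite_self hrows _ hj (by omega), getD_set', if_pos ⟨rfl, by omega⟩]
        exact Or.inr ⟨i, by omega, rfl, by rw [hnb]⟩
      · rw [mread_mwrite_ne _ (fun h => hj0 h.symm), getD_set', if_neg (by tauto)]
        exact relE_mono (hrel j' hj') (by omega)
    · rw [if_neg hx]
      exact ⟨m, by simp only [innerA]; rw [if_neg hx], hrows, hcl,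
        fun j' hj' => relE_mono (hrel j' hj') (by omega)⟩
  | succ j ih =>
    intro hj
    have hjlt : j < ms := by omega
    have hrelj := hrel j hjlt
    have hrelj1 := hrel (j+1) hj
    have hiffj := relE_none_iff hrelj
    have hiffj1 := relE_none_iff hrelj1
    have hcast1 : (((j+1 : Nat) : Int) + 1) = ((j : Int) + 1 + 1) := by push_cast; ring
    rw [hcast1, stagesTo_succ]
    by_cases hsx : sample.getD (j+1) 0 = x
    · -- x occurs at stage j+1: B's scan visits it first
      rw [if_pos hsx]
      by_cases hcond : mreadA m j ll ≠ -1 ∧ mreadA m (j+1) ll = -1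
      · obtain ⟨hvj, hvj1⟩ := hcond
        have hoj : (cur.getD j none).isSome = true := by
          cases h : cur.getD j none with
          | none => exact absurd (hiffj.mpr h) hvj
          | some v => rfl
        have hoj1 : cur.getD (j+1) none = none := hiffj1.mp hvj1
        rcases hrelj with ⟨hv, _⟩ | ⟨p, hp, hv, ho⟩
        · exact absurd hv hvj
        have htn : (((j+1 : Nat) : Int)).toNat = j + 1 := by omega
        have htest : (pdRPort (PySem.List.slice k (some (mreadA m j ll + 1)) (some (i : Int))) R = true
              ∨ mreadA m j ll + 1 = (i : Int))
            ↔ b = ((cur.getD j none).getD (0, 0)).2 := by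
          rw [hv, ho, hb]
          simpa using gap_iff k R p i hp (by omega)
        by_cases hg : b = ((cur.getD j none).getD (0, 0)).2
        · -- gap test passes
          have hinner : innerB sample ms i b nb x
                ((((j+1 : Nat) : Int)) :: (stagesTo sample x ((j : Int) + 1)).reverse) cur
              = (cur.set (j+1) (some ((i : Int), nb)), true) := by
            simp only [innerB, htn, Nat.add_sub_cancel]
            rw [if_pos (show (cur.getD j none).isSome = true ∧ cur.getD (j+1) none = none
              from ⟨hoj, hoj1⟩), if_pos hg]
          have hafter : afterB sample ms i b nb x
                ((((j+1 : Nat) : Int)) :: (stagesTo sample x ((j : Int) + 1)).reverse) cur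
              = cur.set (j+1) (some ((i : Int), nb)) := by
            unfold afterB
            rw [hinner]
            simp
          left
          refine ⟨mwriteA m (j+1) ll (i : Int), ?_, RowsOk_mwrite hrows _ ll _, ?_, ?_⟩
          · simp only [innerA]
            rw [if_pos ⟨hsx.symm, hvj, hvj1⟩, if_pos (htest.mpr hg)]
          · rw [hafter]
            simp [hcl]
          · rw [hafter]
            intro j' hj'
            by_cases hje : j' = j + 1
            · subst hje
              rw [mread_mwrite_self hrows _ hj (by omega), getD_set', if_pos ⟨rfl, by omega⟩]
              exact Or.inr ⟨i, by omega, rfl, by rw [hnb]⟩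
            · rw [mread_mwrite_ne _ (fun h => hje h.symm), getD_set', if_neg (by tauto)]
              exact relE_mono (hrel j' hj') (by omega)
        · -- gap test fails
          have hinner : innerB sample ms i b nb x
                ((((j+1 : Nat) : Int)) :: (stagesTo sample x ((j : Int) + 1)).reverse) cur
              = ((if x = sample.getD 0 0
                  then (List.replicate ms (none : Option (Int × Int))).set 0 (some ((i : Int), nb))
                  else List.replicate ms none), true) := by
            simp only [innerB, htn, Nat.add_sub_cancel]
            rw [if_pos (show (cur.getD j none).isSome = true ∧ cur.getD (j+1) none = none
              from ⟨hoj, hoj1⟩), if_neg hg]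
          right
          refine ⟨by omega, ?_, ?_⟩
          · simp only [innerA]
            rw [if_pos ⟨hsx.symm, hvj, hvj1⟩, if_neg (fun h => hg (htest.mp h))]
          · unfold afterB
            rw [hinner]
            simp
      · -- stage j+1 matches x but the column state skips it
        have htn : (((j+1 : Nat) : Int)).toNat = j + 1 := by omega
        have hcondB : ¬ ((cur.getD j none).isSome = true ∧ cur.getD (j+1) none = none) := by
          intro ⟨h1, h2⟩
          apply hcond
          refine ⟨?_, hiffj1.mpr h2⟩
          intro hv
          rw [hiffj.mp hv] at h1
          simp at h1
        have eA : innerA k sample R m ll (i : Int) x (j+1) = innerA k sample R m ll (i : Int) x j := by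
          simp only [innerA]
          rw [if_neg (by intro ⟨h1, h2, h3⟩; exact hcond ⟨h2, h3⟩)]
        have eB : innerB sample ms i b nb x
              ((((j+1 : Nat) : Int)) :: (stagesTo sample x ((j : Int) + 1)).reverse) cur
            = innerB sample ms i b nb x ((stagesTo sample x ((j : Int) + 1)).reverse) cur := by
          simp only [innerB, htn, Nat.add_sub_cancel]
          rw [if_neg hcondB]
        rw [eA]
        unfold afterB
        rw [eB]
        exact ih hjlt
    · -- stage j+1 does not carry x: A skips it, B never sees it
      rw [if_neg hsx]
      have eA : innerA k sample R m ll (i : Int) x (j+1) = innerA k sample R m ll (i : Int) x j := by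
        simp only [innerA]
        rw [if_neg (by intro ⟨h1, h2, h3⟩; exact hsx h1.symm)]
      rw [eA]
      exact ih hjlt

lemma mread_replicate (ms j : Nat) : mreadA (List.replicate ms [-1]) j 0 = -1 := by
  unfold mreadA
  by_cases hj : j < ms
  · simp [List.getD_eq_getElem?_getD, List.getElem?_replicate, hj]
  · simp [List.getD_eq_getElem?_getD, List.getElem?_replicate, hj]

lemma getD_replicate_none (ms j : Nat) :
    (List.replicate ms (none : Option (Int × Int))).getD j none = none := by
  by_cases hj : j < ms
  · simp [List.getD_eq_getElem?_getD, List.getElem?_replicate, hj]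
  · simp [List.getD_eq_getElem?_getD, List.getElem?_replicate, hj]

lemma main_loop (k sample R : List Int) (ms : Nat) (hms : ms = sample.length)
    (hpos : 0 < ms) :
    ∀ d : Nat, ∀ (i fuel : Nat) (sup : Int) (m : List (List Int)) (ll : Nat)
      (cur : List (Option (Int × Int))) (b : Int),
      i + d = k.length → 2*d + 2 ≤ fuel →
      RowsOk m ms (ll+1) → cur.length = ms →
      (∀ j' < ms, relE k R i (mreadA m j' ll) (cur.getD j' none)) →
      mreadA m (ms-1) ll = -1 →
      b = badCnt k R i →
      loopA k sample R fuel sup m ll (i : Int)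
        = loopB sample ms (PySem.Set.ofList R) (buildPos sample) (k.drop i) i b sup cur := by
  intro d
  induction d with
  | zero =>
    intro i fuel sup m ll cur b hid hfuel _ _ _ _ _
    obtain ⟨f, rfl⟩ : ∃ f, fuel = f + 1 := ⟨fuel - 1, by omega⟩
    have hi : i = k.length := by omega
    rw [List.drop_eq_nil_of_le (by omega)]
    simp only [loopA, loopB]
    rw [if_neg (by exact_mod_cast (by omega : ¬ (i < k.length)))]
  | succ d ih =>
    intro i fuel sup m ll cur b hid hfuel hrows hcl hrel hlast hb
    obtain ⟨f, rfl⟩ : ∃ f, fuel = f + 1 := ⟨fuel - 1, by omega⟩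
    have hi : i < k.length := by omega
    have hx : (PySem.List.pyGet? k (i : Int)).getD 0 = k[i] := by
      rw [PySem.List.pyGet?_natCast]
      simp [List.getElem?_eq_getElem, hi]
    have hdrop : k.drop i = k[i] :: k.drop (i+1) := List.drop_eq_getElem_cons hi
    have hmem : (k[i] ∈ PySem.Set.ofList R) ↔ k[i] ∈ R := PySem.Set.mem_ofList R k[i]
    have hNb : b + (if k[i] ∈ PySem.Set.ofList R then 0 else 1) = badCnt k R (i+1) := by
      rw [badCnt_succ k R i hi, hb]
      by_cases hm : k[i] ∈ R
      · rw [if_pos hm, if_pos (hmem.mpr hm)]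
      · rw [if_neg hm, if_neg (fun h => hm (hmem.mp h))]
    have hcast : ((i : Int) + 1) = ((i + 1 : Nat) : Int) := by push_cast; ring
    have hstage : (PySem.Dict.getD (buildPos sample) k[i] []).reverse
        = (stagesTo sample k[i] (((ms - 1 : Nat) : Int) + 1)).reverse := by
      rw [buildPos_getD sample k[i] (by omega)]
      congr 2
      push_cast
      omega
    simp only [loopA]
    rw [if_pos (by exact_mod_cast hi), hx, ← hms, hdrop]
    simp only [loopB]
    rw [hstage]
    rcases inner_step k sample R ms hms i hi k[i] b (b + (if k[i] ∈ PySem.Set.ofList R then 0 else 1))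
        hb hNb m ll cur hrows hcl hrel (ms - 1) (by omega) with
      ⟨m', eA, hrows', hcl', hrel'⟩ | ⟨hms2, eA, eB⟩
    · rw [eA]
      set curA := afterB sample ms i b (b + (if k[i] ∈ PySem.Set.ofList R then 0 else 1)) k[i]
        ((stagesTo sample k[i] (((ms - 1 : Nat) : Int) + 1)).reverse) cur with hcurA
      have hgoalB : (if (innerB sample ms i b (b + (if k[i] ∈ PySem.Set.ofList R then 0 else 1)) k[i]
            ((stagesTo sample k[i] (((ms - 1 : Nat) : Int) + 1)).reverse) cur).2 = false
            ∧ k[i] = sample.getD 0 0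
          then (innerB sample ms i b (b + (if k[i] ∈ PySem.Set.ofList R then 0 else 1)) k[i]
            ((stagesTo sample k[i] (((ms - 1 : Nat) : Int) + 1)).reverse) cur).1.set 0
              (some ((i : Int), b + (if k[i] ∈ PySem.Set.ofList R then 0 else 1)))
          else (innerB sample ms i b (b + (if k[i] ∈ PySem.Set.ofList R then 0 else 1)) k[i]
            ((stagesTo sample k[i] (((ms - 1 : Nat) : Int) + 1)).reverse) cur).1) = curA := by
        rw [hcurA]
        unfold afterB
        rfl
      rw [hgoalB]
      have hiff := relE_none_iff (hrel' (ms - 1) (by omega))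
      by_cases hdone : mreadA m' (ms-1) ll = -1
      · have hnotsome : ¬ (curA.getD (ms - 1) none).isSome = true := by
          rw [hiff.mp hdone]
          simp
        rw [if_neg (by simp [hdone]), if_neg hnotsome, hcast]
        exact ih (i+1) f sup m' ll curA _ (by omega) (by omega) hrows' hcl' hrel' hdone hNb
      · have hsome : (curA.getD (ms - 1) none).isSome = true := by
          cases h : curA.getD (ms - 1) none with
          | none => exact absurd (hiff.mpr h) hdone
          | some v => rfl
        rw [if_pos (Or.inr hdone), if_pos hdone, if_pos hsome]
        simp only [Bool.false_eq_true, if_false, hcast]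
        exact ih (i+1) f (sup+1) _ (ll+1) _ _ (by omega) (by omega)
          (RowsOk_append hrows') (by simp)
          (fun j' hj' => Or.inl ⟨mread_append_fresh hrows' hj', getD_replicate_none ms j'⟩)
          (mread_append_fresh hrows' (by omega)) hNb
    · -- failed gap test: A retries index i on a fresh column; B resets inline
      rw [eA]
      have hgoalB : (if (innerB sample ms i b (b + (if k[i] ∈ PySem.Set.ofList R then 0 else 1)) k[i]
            ((stagesTo sample k[i] (((ms - 1 : Nat) : Int) + 1)).reverse) cur).2 = false
            ∧ k[i] = sample.getD 0 0
          then (innerB sample ms i b (b + (if k[i] ∈ PySem.Set.ofList R then 0 else 1)) k[i]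
            ((stagesTo sample k[i] (((ms - 1 : Nat) : Int) + 1)).reverse) cur).1.set 0
              (some ((i : Int), b + (if k[i] ∈ PySem.Set.ofList R then 0 else 1)))
          else (innerB sample ms i b (b + (if k[i] ∈ PySem.Set.ofList R then 0 else 1)) k[i]
            ((stagesTo sample k[i] (((ms - 1 : Nat) : Int) + 1)).reverse) cur).1)
          = (if k[i] = sample.getD 0 0
              then (List.replicate ms (none : Option (Int × Int))).set 0 (some ((i : Int),
                b + (if k[i] ∈ PySem.Set.ofList R then 0 else 1)))
              else List.replicate ms none) := by
        rw [← eB]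
        unfold afterB
        rfl
      rw [hgoalB]
      rw [if_pos (Or.inl rfl), if_neg (by simp [hlast])]
      rw [show ((if (true = true) then (i : Int) - 1 else (i : Int)) + 1) = (i : Int) by simp]
      -- second pass of A at the same index i, on the fresh column ll+1
      obtain ⟨f', rfl⟩ : ∃ f', f = f' + 1 := ⟨f - 1, by omega⟩
      have hfresh : ∀ j < ms, mreadA (m.map (fun row => row ++ [-1])) j (ll+1) = -1 :=
        fun j hj => mread_append_fresh hrows hj
      simp only [loopA]
      rw [if_pos (by exact_mod_cast hi), hx, ← hms]
      rw [innerA_fresh k sample R _ (ll+1) (i : Int) k[i] ms hfresh (ms - 1) (by omega)]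
      have hM3 : mreadA (if k[i] = sample.getD 0 0
          then mwriteA (m.map (fun row => row ++ [-1])) 0 (ll+1) (i : Int)
          else m.map (fun row => row ++ [-1])) (ms-1) (ll+1) = -1 := by
        by_cases h0 : k[i] = sample.getD 0 0
        · rw [if_pos h0, mread_mwrite_ne _ (by omega), hfresh (ms-1) (by omega)]
        · rw [if_neg h0]
          exact hfresh (ms-1) (by omega)
      dsimp only
      rw [if_neg (by simpa using hM3)]
      have hcnone : ((if k[i] = sample.getD 0 0
          then (List.replicate ms (none : Option (Int × Int))).set 0 (some ((i : Int),
            b + (if k[i] ∈ PySem.Set.ofList R then 0 else 1)))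
          else List.replicate ms none)).getD (ms - 1) none = none := by
        by_cases h0 : k[i] = sample.getD 0 0
        · rw [if_pos h0, getD_set', if_neg (by omega)]
          exact getD_replicate_none ms (ms-1)
        · rw [if_neg h0]
          exact getD_replicate_none ms (ms-1)
      have hcsome : ¬ (((if k[i] = sample.getD 0 0
          then (List.replicate ms (none : Option (Int × Int))).set 0 (some ((i : Int),
            b + (if k[i] ∈ PySem.Set.ofList R then 0 else 1)))
          else List.replicate ms none)).getD (ms - 1) none).isSome = true := by
        rw [hcnone]; simp
      rw [if_neg hcsome, hcast]
      refine ih (i+1) f' sup _ (ll+1) _ _ (by omega) (by omega) ?_ ?_ ?_ hM3 hNb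
      · by_cases h0 : k[i] = sample.getD 0 0
        · rw [if_pos h0]
          exact RowsOk_mwrite (RowsOk_append hrows) 0 (ll+1) _
        · rw [if_neg h0]
          exact RowsOk_append hrows
      · by_cases h0 : k[i] = sample.getD 0 0
        · rw [if_pos h0]
          simp
        · rw [if_neg h0]
          simp
      · intro j' hj'
        by_cases h0 : k[i] = sample.getD 0 0
        · rw [if_pos h0, if_pos h0]
          by_cases hj0 : j' = 0
          · subst hj0
            rw [mread_mwrite_self (RowsOk_append hrows) _ (by omega) (by omega),
              getD_set', if_pos ⟨rfl, by simp [hpos]⟩]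
            exact Or.inr ⟨i, by omega, rfl, by rw [hNb]⟩
          · rw [mread_mwrite_ne _ (fun h => hj0 h.symm), hfresh j' hj', getD_set',
              if_neg (by tauto)]
            exact Or.inl ⟨rfl, getD_replicate_none ms j'⟩
        · rw [if_neg h0, if_neg h0]
          exact Or.inl ⟨hfresh j' hj', getD_replicate_none ms j'⟩

theorem diguipd_spec : Claim_equal_diguipd := by
  intro k sample R hdom hpre
  unfold Spec_diguipd
  by_cases hs : sample = []
  · subst hs
    have hk : k = [] := by
      rcases hpre with h | h
      · exact absurd rfl h
      · exact h
    subst hk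
    rfl
  · have hpos : 0 < sample.length := List.length_pos_iff.mpr hs
    unfold diguipd diguipd_alt
    have hm : RowsOk (List.replicate sample.length [-1]) sample.length (0+1) := by
      refine ⟨by simp, fun j hj => ?_⟩
      simp [List.getD_eq_getElem?_getD, List.getElem?_replicate, hj]
    have := main_loop k sample R sample.length rfl hpos k.length 0 (2*k.length+2) 0
      (List.replicate sample.length [-1]) 0 (List.replicate sample.length none) 0
      (by omega) (by omega) hm (by simp)
      (fun j hj => Or.inl ⟨mread_replicate _ j, getD_replicate_none _ j⟩)
      (mread_replicate _ _) (by simp [badCnt])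
    simpa using this
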